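-- pv_equiv track=rewrite | github.com/HeinleinSupport/checkMK | cmk/legacy_checks/rstcli.py | parse_rstcli_volumes
-- ===== SOURCE A (Python) =====
-- from typing import Any
--
-- def parse_rstcli_volumes(rows: list[list[str]]) -> dict[str, dict[str, Any]]:
--     volumes: dict[str, dict[str, Any]] = {}
--     current_volume: dict[str, Any] = {}
--
--     for row in rows:
--         if row[0] == "Name":
--             current_volume = {}
--             volumes[row[1].strip()] = current_volume
--         else:
--             current_volume[row[0]] = row[1].strip()
--
--     return volumes
-- ===== SOURCE B (Python) =====
-- def parse_rstcli_volumes(rows: list[list[str]]) -> dict[str, dict[str, str]]: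
--     # Block decomposition: skip rows before the first "Name" row, then repeatedly
--     # take a "Name" row and the run of non-"Name" rows after it as one volume block.
--     volumes: dict[str, dict[str, str]] = {}
--     rest = rows
--     while rest and rest[0][0] != "Name":
--         rest = rest[1:]
--     while rest:
--         head, rest = rest[0], rest[1:]
--         body = []
--         while rest and rest[0][0] != "Name":
--             body.append(rest[0])
--             rest = rest[1:]
--         volumes[head[1].strip()] = {r[0]: r[1].strip() for r in body}
--     return volumes
-- ===== Notes on version B (the rewrite author's own statement) =====
-- stated objective: alternative
-- what changed: A's stateful single pass with a mutable current-volume dict aliased into the result is replaced by a block decomposition: skip rows before the first 'Name' row, then repeatedly consume a 'Name' row plus its run of non-'Name' rows and build that volume's dict at once.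
import Mathlib
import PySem

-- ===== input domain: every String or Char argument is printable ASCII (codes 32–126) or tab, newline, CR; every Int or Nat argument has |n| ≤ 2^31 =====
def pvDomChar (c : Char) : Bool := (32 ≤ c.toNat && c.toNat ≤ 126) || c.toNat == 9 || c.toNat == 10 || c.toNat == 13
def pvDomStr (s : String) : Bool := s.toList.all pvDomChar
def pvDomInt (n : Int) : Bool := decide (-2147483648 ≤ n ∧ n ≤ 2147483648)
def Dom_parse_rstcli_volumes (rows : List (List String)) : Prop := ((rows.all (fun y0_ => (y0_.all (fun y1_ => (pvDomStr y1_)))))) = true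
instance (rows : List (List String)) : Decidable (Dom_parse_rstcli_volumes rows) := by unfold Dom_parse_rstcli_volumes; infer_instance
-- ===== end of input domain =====

-- B replaces A's stateful single pass (a mutable current-volume dict aliased into the result)
-- by a block decomposition: skip the rows before the first "Name" row, then repeatedly take a
-- "Name" row plus the run of non-"Name" rows after it and build that volume's dict at once
-- (objective: alternative decomposition, same cost).

-- ===== PORT A =====
-- row[0] / row[1].strip(); under Pre_ every row has length ≥ 2 so the defaults are never used
def pvRowKey (r : List String) : String := (PySem.List.pyGet? r 0).getD ""
def pvRowVal (r : List String) : String := PySem.Str.strip ((PySem.List.pyGet? r 1).getD "")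

-- A's current_volume always aliases volumes[last name] (or is the discarded dict created
-- before the first "Name" row); the port models the alias by that last name (Option String).
def pvStepA (st : PySem.Dict String (PySem.Dict String String) × Option String)
    (row : List String) : PySem.Dict String (PySem.Dict String String) × Option String :=
  if pvRowKey row = "Name" then
    (st.1.insert (pvRowVal row) PySem.Dict.empty, some (pvRowVal row))
  else
    match st.2 with
    | none => st  -- writes into the discarded pre-first-"Name" dict: volumes unchanged
    | some n => (st.1.modify n PySem.Dict.empty (fun d => d.insert (pvRowKey row) (pvRowVal row)), st.2)

def parse_rstcli_volumes (rows : List (List String)) : List (String × List (String × String)) :=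
  ((rows.foldl pvStepA (PySem.Dict.empty, none)).1).items.map (fun p => (p.1, p.2.items))

-- ===== PORT B =====
def pvNotName (r : List String) : Bool := pvRowKey r != "Name"

-- {r[0]: r[1].strip() for r in body}
def pvBodyDict (body : List (List String)) : PySem.Dict String String :=
  body.foldl (fun d r => d.insert (pvRowKey r) (pvRowVal r)) PySem.Dict.empty

-- the second while loop of Source B: consume one block (head + run of non-"Name" rows) per step;
-- the fuel (initialised to the list length, each step consumes ≥ 1 row) only makes the
-- recursion structural
def pvAltLoop : Nat → PySem.Dict String (PySem.Dict String String) → List (List String) →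
    PySem.Dict String (PySem.Dict String String)
  | 0, volumes, _ => volumes
  | _ + 1, volumes, [] => volumes
  | fuel + 1, volumes, head :: rest =>
      pvAltLoop fuel (volumes.insert (pvRowVal head) (pvBodyDict (rest.takeWhile pvNotName)))
        (rest.dropWhile pvNotName)

def parse_rstcli_volumes_alt (rows : List (List String)) : List (String × List (String × String)) :=
  let rest := rows.dropWhile pvNotName
  (pvAltLoop rest.length PySem.Dict.empty rest).items.map (fun p => (p.1, p.2.items))

-- ===== PRECONDITION & SPEC =====
-- Pre_ excludes exactly the inputs where A raises IndexError: a row with fewer than 2 entries.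
def Pre_parse_rstcli_volumes (rows : List (List String)) : Prop :=
  ∀ r ∈ rows, 2 ≤ r.length
instance (rows : List (List String)) : Decidable (Pre_parse_rstcli_volumes rows) := by
  unfold Pre_parse_rstcli_volumes; infer_instance

def pvWitness_parse_rstcli_volumes : List (List String) :=
  [["Name", " vol1 "], ["size", "10 "], ["state", "ok"], ["Name", "vol2"], ["size", "7"]]

def Spec_parse_rstcli_volumes (rows : List (List String)) (out : List (String × List (String × String))) : Prop := out = parse_rstcli_volumes_alt rows
instance (rows : List (List String)) (out : List (String × List (String × String))) : Decidable (Spec_parse_rstcli_volumes rows out) := by unfold Spec_parse_rstcli_volumes; infer_instance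

-- ===== CLAIM (what is proved, stated in full; the proofs are below) =====
def Claim_equal_parse_rstcli_volumes : Prop := ∀ (rows : List (List String)), Dom_parse_rstcli_volumes rows → Pre_parse_rstcli_volumes rows → Spec_parse_rstcli_volumes rows (parse_rstcli_volumes rows)

-- ===== LEMMAS AND PROOFS =====

-- overwrite-then-modify at the same key is a single overwrite (positions preserved)
theorem pv_insert_modify {ν : Type} (d : PySem.Dict String ν) (k : String) (v d0 : ν)
    (f : ν → ν) : (d.insert k v).modify k d0 f = d.insert k (f v) := by
  simp only [PySem.Dict.modify, PySem.Dict.getD_insert_self, PySem.Dict.insert_insert_self]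

-- A's fold from the state just after a "Name" row equals B's block loop
theorem pv_foldA_some (rs : List (List String)) : ∀ (fuel : Nat), rs.length ≤ fuel →
    ∀ (vol : PySem.Dict String (PySem.Dict String String)) (n : String) (d : PySem.Dict String String),
      (rs.foldl pvStepA (vol.insert n d, some n)).1
        = pvAltLoop fuel (vol.insert n ((rs.takeWhile pvNotName).foldl
            (fun d r => d.insert (pvRowKey r) (pvRowVal r)) d)) (rs.dropWhile pvNotName) := by
  induction rs with
  | nil =>
    intro fuel _ vol n d
    cases fuel <;> simp [pvAltLoop]
  | cons r rs ih =>
    intro fuel hf vol n d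
    cases fuel with
    | zero => simp at hf
    | succ f =>
      by_cases h : pvNotName r = true
      · have hkey : ¬ pvRowKey r = "Name" := by simpa [pvNotName] using h
        have hstep : pvStepA (vol.insert n d, some n) r
            = (vol.insert n (d.insert (pvRowKey r) (pvRowVal r)), some n) := by
          simp [pvStepA, hkey, pv_insert_modify]
        simp only [List.foldl_cons, hstep, List.takeWhile_cons, List.dropWhile_cons, h,
          if_true]
        exact ih (f + 1) (by simp at hf; omega) vol n
          (d.insert (pvRowKey r) (pvRowVal r))
      · have hkey : pvRowKey r = "Name" := by simpa [pvNotName] using h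
        have hstep : pvStepA (vol.insert n d, some n) r
            = ((vol.insert n d).insert (pvRowVal r) PySem.Dict.empty, some (pvRowVal r)) := by
          simp [pvStepA, hkey]
        simp only [List.foldl_cons, hstep, List.takeWhile_cons, List.dropWhile_cons, h]
        show _ = pvAltLoop f ((vol.insert n d).insert (pvRowVal r)
          (pvBodyDict (rs.takeWhile pvNotName))) (rs.dropWhile pvNotName)
        rw [show pvBodyDict (rs.takeWhile pvNotName) = (rs.takeWhile pvNotName).foldl
          (fun d r => d.insert (pvRowKey r) (pvRowVal r)) PySem.Dict.empty from rfl]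
        exact ih f (Nat.le_of_succ_le_succ hf) (vol.insert n d) (pvRowVal r) PySem.Dict.empty

-- A's whole fold (current_volume still the discarded dict) equals B's skip-then-loop
theorem pv_foldA_none (rows : List (List String)) : ∀ (fuel : Nat),
    (rows.dropWhile pvNotName).length ≤ fuel →
    ∀ (vol : PySem.Dict String (PySem.Dict String String)),
      (rows.foldl pvStepA (vol, none)).1 = pvAltLoop fuel vol (rows.dropWhile pvNotName) := by
  induction rows with
  | nil =>
    intro fuel _ vol
    cases fuel <;> simp [pvAltLoop]
  | cons r rs ih =>
    intro fuel hf vol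
    by_cases h : pvNotName r = true
    · have hkey : ¬ pvRowKey r = "Name" := by simpa [pvNotName] using h
      have hstep : pvStepA (vol, none) r = (vol, none) := by simp [pvStepA, hkey]
      simp only [List.dropWhile_cons, h, if_true] at hf ⊢
      simp only [List.foldl_cons, hstep]
      exact ih fuel hf vol
    · have hkey : pvRowKey r = "Name" := by simpa [pvNotName] using h
      have hstep : pvStepA (vol, none) r
          = (vol.insert (pvRowVal r) PySem.Dict.empty, some (pvRowVal r)) := by
        simp [pvStepA, hkey]
      simp only [List.dropWhile_cons, h] at hf ⊢
      cases fuel with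
      | zero => simp at hf
      | succ f =>
        simp only [List.foldl_cons, hstep]
        show _ = pvAltLoop f (vol.insert (pvRowVal r) (pvBodyDict (rs.takeWhile pvNotName)))
          (rs.dropWhile pvNotName)
        rw [show pvBodyDict (rs.takeWhile pvNotName) = (rs.takeWhile pvNotName).foldl
          (fun d r => d.insert (pvRowKey r) (pvRowVal r)) PySem.Dict.empty from rfl]
        exact pv_foldA_some rs f (by simp at hf; omega) vol (pvRowVal r) PySem.Dict.empty

-- ===== VERDICT (by name: the statement is the Claim_ definition above) =====
theorem parse_rstcli_volumes_spec : Claim_equal_parse_rstcli_volumes := by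
  intro rows _ _
  unfold Spec_parse_rstcli_volumes parse_rstcli_volumes parse_rstcli_volumes_alt
  rw [pv_foldA_none rows (rows.dropWhile pvNotName).length le_rfl PySem.Dict.empty]
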